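-- pv_equiv track=rewrite | github.com/StranikS-Scan/WorldOfTanks-Decompiled | source/res/scripts/client/gui/impl/auxiliary/rewards_helper.py | splitPremiumDays
-- ===== SOURCE A (Python) =====
-- def splitPremiumDays(days):
--     available = (360, 180, 90, 30, 14, 7, 3, 2, 1)
--
--     def nearest(array, value):
--         index = 0
--         for idx, i in enumerate(array):
--             index = idx
--             if value >= i:
--                 break
--
--         return array[index]
--
--     result = []
--     while days > 0:
--         near = nearest(available, days)
--         days -= near
--         result.append(near)
--
--     return result
-- ===== SOURCE B (Python) =====
-- def splitPremiumDays(days):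
--     if days <= 0:
--         return []
--     result = []
--     for d in (360, 180, 90, 30, 14, 7, 3, 2, 1):
--         q = days // d
--         result.extend([d] * q)
--         days -= q * d
--     return result
-- ===== Notes on version B (the rewrite author's own statement) =====
-- stated objective: faster
-- what changed: Replaces the repeated subtract-the-nearest-denomination loop (an inner nearest() scan and one append per output element) with a single pass over the nine denominations using floor division to emit each denomination's whole run at once.
import Mathlib
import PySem

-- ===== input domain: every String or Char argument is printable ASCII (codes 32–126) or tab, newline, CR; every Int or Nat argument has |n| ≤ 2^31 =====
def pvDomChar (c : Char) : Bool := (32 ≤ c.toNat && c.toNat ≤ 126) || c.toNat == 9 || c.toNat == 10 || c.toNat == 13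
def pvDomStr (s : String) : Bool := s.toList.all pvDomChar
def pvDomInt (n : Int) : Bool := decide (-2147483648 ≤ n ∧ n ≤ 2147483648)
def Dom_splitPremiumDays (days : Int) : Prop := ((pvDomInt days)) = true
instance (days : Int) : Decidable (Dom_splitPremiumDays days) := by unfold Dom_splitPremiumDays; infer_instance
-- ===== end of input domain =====

-- B replaces A's subtract-the-nearest-denomination loop by one division-based pass over the
-- nine denominations (objective: faster by a constant factor; same return value).

-- ===== PORT A =====
-- the tuple 'available'
def pvAvail : List Int := [360, 180, 90, 30, 14, 7, 3, 2, 1]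

-- 'for idx, i in enumerate(array): index = idx; if value >= i: break'
def pvNearestLoop (value : Int) (index : Int) : List (Int × Int) → Int
  | [] => index
  | (idx, i) :: rest => if value ≥ i then idx else pvNearestLoop value idx rest

-- 'nearest(array, value)'; 'array[index]' is in range here (array is the fixed
-- nonempty tuple and index is a yielded enumerate index), so pyGet? is some and .getD 0 is exact
def pvNearest (array : List Int) (value : Int) : Int :=
  (PySem.List.pyGet? array (pvNearestLoop value 0 (PySem.List.enumerate array))).getD 0

-- termination helper for the while loop: the subtracted denomination is positive
theorem pvNearest_pos (v : Int) : 1 ≤ pvNearest pvAvail v := by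
  unfold pvNearest pvAvail
  simp only [PySem.List.enumerate_cons, PySem.List.enumerate_nil, pvNearestLoop]
  split_ifs <;> decide

-- 'while days > 0: near = nearest(available, days); days -= near; result.append(near)'
def pvALoop (days : Int) (result : List Int) : List Int :=
  if 0 < days then
    let near := pvNearest pvAvail days
    pvALoop (days - near) (result ++ [near])
  else result
termination_by days.toNat
decreasing_by
  have := pvNearest_pos days
  omega

def splitPremiumDays (days : Int) : List Int := pvALoop days []

-- ===== PORT B =====
-- the loop body: q = days // d; result.extend([d] * q); days -= q * d
def pvStep (acc : Int × List Int) (d : Int) : Int × List Int :=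
  let q := PySem.Int.floordiv acc.1 d
  (acc.1 - q * d, acc.2 ++ PySem.List.pyRepeat [d] q)

def splitPremiumDays_alt (days : Int) : List Int :=
  if days ≤ 0 then []
  else
    (([360, 180, 90, 30, 14, 7, 3, 2, 1] : List Int).foldl pvStep (days, ([] : List Int))).2

-- ===== PRECONDITION & SPEC =====
def Spec_splitPremiumDays (days : Int) (out : List Int) : Prop := out = splitPremiumDays_alt days
instance (days : Int) (out : List Int) : Decidable (Spec_splitPremiumDays days out) := by unfold Spec_splitPremiumDays; infer_instance

-- ===== CLAIM (what is proved, stated in full; the proofs are below) =====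
def Claim_equal_splitPremiumDays : Prop := ∀ (days : Int), Dom_splitPremiumDays days → Spec_splitPremiumDays days (splitPremiumDays days)

-- ===== LEMMAS AND PROOFS =====

-- the greedy choice as a closed if-chain
def pvN (v : Int) : Int :=
  if 360 ≤ v then 360 else if 180 ≤ v then 180 else if 90 ≤ v then 90
  else if 30 ≤ v then 30 else if 14 ≤ v then 14 else if 7 ≤ v then 7
  else if 3 ≤ v then 3 else if 2 ≤ v then 2 else 1

theorem pvN_bounds (v : Int) (h : 0 < v) : 1 ≤ pvN v ∧ pvN v ≤ v := by
  unfold pvN; split_ifs <;> omega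

theorem pvNearest_eq (v : Int) : pvNearest pvAvail v = pvN v := by
  unfold pvNearest pvAvail pvN
  simp only [PySem.List.enumerate_cons, PySem.List.enumerate_nil, pvNearestLoop]
  split_ifs <;> rfl

-- recursive view of B's fold result
def pvR (v : Int) : List Int → List Int
  | [] => []
  | d :: ds =>
      List.replicate (PySem.Int.floordiv v d).toNat d ++
        pvR (v - PySem.Int.floordiv v d * d) ds

theorem pvFold_eq (ds : List Int) (v : Int) (acc : List Int) :
    (ds.foldl pvStep (v, acc)).2 = acc ++ pvR v ds := by
  induction ds generalizing v acc with
  | nil => simp [pvR]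
  | cons d ds ih =>
    have hstep : pvStep (v, acc) d
        = (v - PySem.Int.floordiv v d * d, acc ++ PySem.List.pyRepeat [d] (PySem.Int.floordiv v d)) := rfl
    rw [List.foldl_cons, hstep, ih]
    simp [pvR, PySem.List.pyRepeat_singleton, List.append_assoc]

theorem pvAlt_eq (v : Int) (h : 0 < v) :
    splitPremiumDays_alt v = pvR v pvAvail := by
  unfold splitPremiumDays_alt
  rw [if_neg (by omega), pvFold_eq]
  rfl

theorem pvR_skip (d v : Int) (ds : List Int) (hd : 0 < d) (h0 : 0 ≤ v) (hv : v < d) :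
    pvR v (d :: ds) = pvR v ds := by
  have hq : PySem.Int.floordiv v d = 0 := by
    rw [PySem.Int.floordiv_eq_ediv_of_pos hd]
    exact Int.ediv_eq_zero_of_lt h0 hv
  simp [pvR, hq]

theorem pvR_take (d v : Int) (ds : List Int) (hd : 0 < d) (h : d ≤ v) :
    pvR v (d :: ds) = d :: pvR (v - d) (d :: ds) := by
  have hne : d ≠ 0 := by omega
  have hq : v / d = (v - d) / d + 1 := by
    have h2 := Int.add_mul_ediv_right (v - d) 1 hne
    have h3 : v - d + 1 * d = v := by ring
    rw [h3] at h2
    exact h2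
  have hnn : 0 ≤ (v - d) / d := Int.ediv_nonneg (by omega) (by omega)
  have htn : (v / d).toNat = ((v - d) / d).toNat + 1 := by omega
  have hrem : v - v / d * d = v - d - (v - d) / d * d := by
    rw [hq]; ring
  simp only [pvR, PySem.Int.floordiv_eq_ediv_of_pos hd, htn, hrem,
    List.replicate_succ, List.cons_append]

theorem pvR_zero : pvR 0 pvAvail = [] := by decide

theorem pvR_step (v : Int) (h : 0 < v) :
    pvR v pvAvail = pvN v :: pvR (v - pvN v) pvAvail := by
  unfold pvAvail pvN
  split_ifs with h1 h2 h3 h4 h5 h6 h7 h8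
  · rw [pvR_take 360 v _ (by norm_num) h1]
  · rw [pvR_skip 360 v _ (by norm_num) (by omega) (by omega),
        pvR_take 180 v _ (by norm_num) h2,
        pvR_skip 360 (v - 180) _ (by norm_num) (by omega) (by omega)]
  · rw [pvR_skip 360 v _ (by norm_num) (by omega) (by omega),
        pvR_skip 180 v _ (by norm_num) (by omega) (by omega),
        pvR_take 90 v _ (by norm_num) h3,
        pvR_skip 360 (v - 90) _ (by norm_num) (by omega) (by omega),
        pvR_skip 180 (v - 90) _ (by norm_num) (by omega) (by omega)]
  · rw [pvR_skip 360 v _ (by norm_num) (by omega) (by omega),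
        pvR_skip 180 v _ (by norm_num) (by omega) (by omega),
        pvR_skip 90 v _ (by norm_num) (by omega) (by omega),
        pvR_take 30 v _ (by norm_num) h4,
        pvR_skip 360 (v - 30) _ (by norm_num) (by omega) (by omega),
        pvR_skip 180 (v - 30) _ (by norm_num) (by omega) (by omega),
        pvR_skip 90 (v - 30) _ (by norm_num) (by omega) (by omega)]
  · rw [pvR_skip 360 v _ (by norm_num) (by omega) (by omega),
        pvR_skip 180 v _ (by norm_num) (by omega) (by omega),
        pvR_skip 90 v _ (by norm_num) (by omega) (by omega),
        pvR_skip 30 v _ (by norm_num) (by omega) (by omega),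
        pvR_take 14 v _ (by norm_num) h5,
        pvR_skip 360 (v - 14) _ (by norm_num) (by omega) (by omega),
        pvR_skip 180 (v - 14) _ (by norm_num) (by omega) (by omega),
        pvR_skip 90 (v - 14) _ (by norm_num) (by omega) (by omega),
        pvR_skip 30 (v - 14) _ (by norm_num) (by omega) (by omega)]
  · rw [pvR_skip 360 v _ (by norm_num) (by omega) (by omega),
        pvR_skip 180 v _ (by norm_num) (by omega) (by omega),
        pvR_skip 90 v _ (by norm_num) (by omega) (by omega),
        pvR_skip 30 v _ (by norm_num) (by omega) (by omega),
        pvR_skip 14 v _ (by norm_num) (by omega) (by omega),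
        pvR_take 7 v _ (by norm_num) h6,
        pvR_skip 360 (v - 7) _ (by norm_num) (by omega) (by omega),
        pvR_skip 180 (v - 7) _ (by norm_num) (by omega) (by omega),
        pvR_skip 90 (v - 7) _ (by norm_num) (by omega) (by omega),
        pvR_skip 30 (v - 7) _ (by norm_num) (by omega) (by omega),
        pvR_skip 14 (v - 7) _ (by norm_num) (by omega) (by omega)]
  · rw [pvR_skip 360 v _ (by norm_num) (by omega) (by omega),
        pvR_skip 180 v _ (by norm_num) (by omega) (by omega),
        pvR_skip 90 v _ (by norm_num) (by omega) (by omega),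
        pvR_skip 30 v _ (by norm_num) (by omega) (by omega),
        pvR_skip 14 v _ (by norm_num) (by omega) (by omega),
        pvR_skip 7 v _ (by norm_num) (by omega) (by omega),
        pvR_take 3 v _ (by norm_num) h7,
        pvR_skip 360 (v - 3) _ (by norm_num) (by omega) (by omega),
        pvR_skip 180 (v - 3) _ (by norm_num) (by omega) (by omega),
        pvR_skip 90 (v - 3) _ (by norm_num) (by omega) (by omega),
        pvR_skip 30 (v - 3) _ (by norm_num) (by omega) (by omega),
        pvR_skip 14 (v - 3) _ (by norm_num) (by omega) (by omega),
        pvR_skip 7 (v - 3) _ (by norm_num) (by omega) (by omega)]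
  · rw [pvR_skip 360 v _ (by norm_num) (by omega) (by omega),
        pvR_skip 180 v _ (by norm_num) (by omega) (by omega),
        pvR_skip 90 v _ (by norm_num) (by omega) (by omega),
        pvR_skip 30 v _ (by norm_num) (by omega) (by omega),
        pvR_skip 14 v _ (by norm_num) (by omega) (by omega),
        pvR_skip 7 v _ (by norm_num) (by omega) (by omega),
        pvR_skip 3 v _ (by norm_num) (by omega) (by omega),
        pvR_take 2 v _ (by norm_num) h8,
        pvR_skip 360 (v - 2) _ (by norm_num) (by omega) (by omega),
        pvR_skip 180 (v - 2) _ (by norm_num) (by omega) (by omega),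
        pvR_skip 90 (v - 2) _ (by norm_num) (by omega) (by omega),
        pvR_skip 30 (v - 2) _ (by norm_num) (by omega) (by omega),
        pvR_skip 14 (v - 2) _ (by norm_num) (by omega) (by omega),
        pvR_skip 7 (v - 2) _ (by norm_num) (by omega) (by omega),
        pvR_skip 3 (v - 2) _ (by norm_num) (by omega) (by omega)]
  · rw [pvR_skip 360 v _ (by norm_num) (by omega) (by omega),
        pvR_skip 180 v _ (by norm_num) (by omega) (by omega),
        pvR_skip 90 v _ (by norm_num) (by omega) (by omega),
        pvR_skip 30 v _ (by norm_num) (by omega) (by omega),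
        pvR_skip 14 v _ (by norm_num) (by omega) (by omega),
        pvR_skip 7 v _ (by norm_num) (by omega) (by omega),
        pvR_skip 3 v _ (by norm_num) (by omega) (by omega),
        pvR_skip 2 v _ (by norm_num) (by omega) (by omega),
        pvR_take 1 v _ (by norm_num) (by omega),
        pvR_skip 360 (v - 1) _ (by norm_num) (by omega) (by omega),
        pvR_skip 180 (v - 1) _ (by norm_num) (by omega) (by omega),
        pvR_skip 90 (v - 1) _ (by norm_num) (by omega) (by omega),
        pvR_skip 30 (v - 1) _ (by norm_num) (by omega) (by omega),
        pvR_skip 14 (v - 1) _ (by norm_num) (by omega) (by omega),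
        pvR_skip 7 (v - 1) _ (by norm_num) (by omega) (by omega),
        pvR_skip 3 (v - 1) _ (by norm_num) (by omega) (by omega),
        pvR_skip 2 (v - 1) _ (by norm_num) (by omega) (by omega)]

theorem pvAlt_rec (v : Int) (h : 0 < v) :
    splitPremiumDays_alt v = pvN v :: splitPremiumDays_alt (v - pvN v) := by
  obtain ⟨hb1, hb2⟩ := pvN_bounds v h
  rw [pvAlt_eq v h, pvR_step v h]
  by_cases h0 : 0 < v - pvN v
  · rw [pvAlt_eq _ h0]
  · have hz : v - pvN v = 0 := by omega
    rw [hz, pvR_zero]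
    unfold splitPremiumDays_alt
    rw [if_pos (by omega)]

theorem pvALoop_eq (n : Nat) : ∀ (v : Int), v.toNat ≤ n → ∀ (acc : List Int),
    pvALoop v acc = acc ++ splitPremiumDays_alt v := by
  induction n with
  | zero =>
    intro v hv acc
    have hv' : ¬ 0 < v := by omega
    rw [pvALoop, if_neg hv']
    unfold splitPremiumDays_alt
    rw [if_pos (by omega)]
    simp
  | succ n ih =>
    intro v hv acc
    by_cases h : 0 < v
    · obtain ⟨hb1, hb2⟩ := pvN_bounds v h
      rw [pvALoop, if_pos h]
      simp only [pvNearest_eq v]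
      rw [ih (v - pvN v) (by omega), pvAlt_rec v h]
      simp
    · rw [pvALoop, if_neg h]
      unfold splitPremiumDays_alt
      rw [if_pos (by omega)]
      simp

-- ===== VERDICT (by name: the statement is the Claim_ definition above) =====
theorem splitPremiumDays_spec : Claim_equal_splitPremiumDays := by
  intro days _
  unfold Spec_splitPremiumDays splitPremiumDays
  simpa using pvALoop_eq days.toNat days le_rfl []
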